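-- pv_equiv track=rewrite | github.com/liupengsay/PyIsTheBestLang | algorithm/src/mathmatics/number_theory.py | lc_6334
-- ===== SOURCE A (Python) =====
-- from typing import List
-- import math
-- from collections import defaultdict, Counter, deque
-- import math
-- from collections import Counter
--
-- def lc_6334(nums: List[int]) -> int:
--     # 模板：非空子集乘积不含除 1 之外任何平方整除数，即乘积质数因子的幂次均为 1（背包DP计数）
--     dct = {2, 3, 5, 6, 7, 10, 11, 13, 14, 15, 17, 19, 21, 22, 23, 26, 29, 30}
--     # 集合为质数因子幂次均为 1
--     mod = 10 ** 9 + 7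
--     cnt = Counter(nums)
--     pre = defaultdict(int)
--     for num in cnt:
--         if num in dct:
--             cur = pre.copy()
--             for p in pre:
--                 if math.gcd(p, num) == 1:
--                     cur[p * num] += pre[p] * cnt[num]
--                     cur[p * num] %= mod
--             cur[num] += cnt[num]
--             pre = cur.copy()
--     # 1 需要特殊处理
--     p = pow(2, cnt[1], mod)
--     ans = sum(pre.values()) * p
--     ans += p - 1
--     return ans % mod
-- ===== SOURCE B (Python) =====
-- from collections import Counter
--
-- def lc_6334(nums):
--     # Bitmask subset-product DP over the ten primes <= 30, fixed 1024-state array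
--     # instead of a dict keyed by running products.
--     mod = 10 ** 9 + 7
--     primes = [2, 3, 5, 7, 11, 13, 17, 19, 23, 29]
--     mask = {}
--     for v in (2, 3, 5, 6, 7, 10, 11, 13, 14, 15, 17, 19, 21, 22, 23, 26, 29, 30):
--         m = 0
--         for i, q in enumerate(primes):
--             if v % q == 0:
--                 m |= 1 << i
--         mask[v] = m
--     cnt = Counter(nums)
--     dp = [0] * 1024
--     dp[0] = 1
--     ones = 0
--     for num, c in cnt.items():
--         if num == 1:
--             ones = c
--         if num in mask:
--             m = mask[num]
--             ndp = dp[:]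
--             for s in range(1024):
--                 if s & m == 0:
--                     ndp[s | m] = (ndp[s | m] + dp[s] * c) % mod
--             dp = ndp
--     p = pow(2, ones, mod)
--     return (sum(dp[1:]) * p + p - 1) % mod
-- ===== Notes on version B (the rewrite author's own statement) =====
-- stated objective: alternative
-- what changed: Replaces A's dict keyed by running squarefree products (copied and rescanned per distinct value, with gcd coprimality tests) by a fixed 1024-entry DP array indexed by bitmasks over the ten primes <= 30, swept uniformly with bitwise disjointness tests; the value 1 is handled by a counter threaded through the same single pass instead of a separate Counter lookup.
import Mathlib
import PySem

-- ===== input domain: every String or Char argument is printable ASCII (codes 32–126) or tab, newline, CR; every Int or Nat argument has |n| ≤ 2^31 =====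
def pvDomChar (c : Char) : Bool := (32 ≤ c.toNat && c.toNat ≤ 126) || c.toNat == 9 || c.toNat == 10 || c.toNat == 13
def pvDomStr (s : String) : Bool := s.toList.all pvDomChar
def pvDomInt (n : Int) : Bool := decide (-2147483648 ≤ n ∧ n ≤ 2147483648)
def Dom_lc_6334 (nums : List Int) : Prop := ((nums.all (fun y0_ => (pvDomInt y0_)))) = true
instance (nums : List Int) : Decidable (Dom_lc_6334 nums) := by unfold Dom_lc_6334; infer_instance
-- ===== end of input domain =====

-- B replaces A's product-keyed dict DP by a fixed 1024-state bitmask DP over the ten primes ≤ 30 (alternative data structure, similar cost).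


-- ===== PORT A =====
def pvDctA : List Int := [2, 3, 5, 6, 7, 10, 11, 13, 14, 15, 17, 19, 21, 22, 23, 26, 29, 30]

def pvModA : Int := 1000000007  -- mod = 10 ** 9 + 7

-- loop body for one distinct num (in dct): copy pre, combine with coprime products, add num itself
def pvStepA (pre : PySem.Dict Int Int) (num c : Int) : PySem.Dict Int Int :=
  let cur := pre.keys.foldl (fun cur p =>
    if Int.gcd p num = 1 then
      cur.insert (p * num) (PySem.Int.mod (cur.getD (p * num) 0 + pre.getD p 0 * c) pvModA)
    else cur) pre
  cur.insert num (cur.getD num 0 + c)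

def lc_6334 (nums : List Int) : Int :=
  let cnt := PySem.Dict.counter nums
  let pre := cnt.keys.foldl (fun pre num =>
    if num ∈ pvDctA then pvStepA pre num (cnt.getD num 0) else pre) PySem.Dict.empty
  let p := PySem.Int.powMod 2 (cnt.getD 1 0).toNat pvModA
  PySem.Int.mod (pre.values.sum * p + (p - 1)) pvModA

-- ===== PORT B =====
def pvModB : Int := 1000000007

def pvPrimesB : List Int := [2, 3, 5, 7, 11, 13, 17, 19, 23, 29]

def pvDctB : List Int := [2, 3, 5, 6, 7, 10, 11, 13, 14, 15, 17, 19, 21, 22, 23, 26, 29, 30]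

-- mask = {v: bitmask of primes dividing v}
def pvMaskD : PySem.Dict Int Int :=
  pvDctB.foldl (fun d v =>
    d.insert v ((PySem.List.enumerate pvPrimesB 0).foldl
      (fun m iq => if PySem.Int.mod v iq.2 = 0 then PySem.Int.bor m ((1 : Int) <<< iq.1.toNat) else m) 0))
    PySem.Dict.empty

-- inner sweep: for s in range(1024): if s & m == 0: ndp[s|m] = (ndp[s|m] + dp[s]*c) % mod
def pvStepB (dp : List Int) (m c : Int) : List Int :=
  (PySem.List.pyRange 0 1024 1).foldl (fun ndp s =>
    if PySem.Int.band s m = 0 then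
      PySem.List.pySetD ndp (PySem.Int.bor s m)
        (PySem.Int.mod (PySem.List.pyGetD ndp (PySem.Int.bor s m) 0 + PySem.List.pyGetD dp s 0 * c) pvModB)
    else ndp) dp

def lc_6334_alt (nums : List Int) : Int :=
  let cnt := PySem.Dict.counter nums
  let dp0 := PySem.List.pySetD (List.replicate 1024 (0 : Int)) 0 1
  let st := cnt.items.foldl (fun (st : List Int × Int) nc =>
    let ones := if nc.1 = 1 then nc.2 else st.2
    if pvMaskD.contains nc.1 then (pvStepB st.1 (pvMaskD.getD nc.1 0) nc.2, ones) else (st.1, ones))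
    (dp0, 0)
  let p := PySem.Int.powMod 2 st.2.toNat pvModB
  PySem.Int.mod ((PySem.List.slice st.1 (some 1) none).sum * p + (p - 1)) pvModB

-- ===== PRECONDITION & SPEC =====
def Spec_lc_6334 (nums : List Int) (out : Int) : Prop := out = lc_6334_alt nums
instance (nums : List Int) (out : Int) : Decidable (Spec_lc_6334 nums out) := by unfold Spec_lc_6334; infer_instance

-- ===== CLAIM (what is proved, stated in full; the proofs are below) =====
def Claim_equal_lc_6334 : Prop := ∀ (nums : List Int), Dom_lc_6334 nums → Spec_lc_6334 nums (lc_6334 nums)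

-- ===== LEMMAS AND PROOFS =====

-- the squarefree product with prime support given by the bitmask m (proof-side model)
def pvP (m : Nat) : Int :=
  (((if m % 2 = 1 then 2 else 1) * (if m / 2 % 2 = 1 then 3 else 1) * (if m / 4 % 2 = 1 then 5 else 1) *
   (if m / 8 % 2 = 1 then 7 else 1) * (if m / 16 % 2 = 1 then 11 else 1) * (if m / 32 % 2 = 1 then 13 else 1) *
   (if m / 64 % 2 = 1 then 17 else 1) * (if m / 128 % 2 = 1 then 19 else 1) * (if m / 256 % 2 = 1 then 23 else 1) *
   (if m / 512 % 2 = 1 then 29 else 1) : Nat) : Int)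

-- the prime-support bitmask of an integer (only used on squarefree products)
def pvMaskOf (v : Int) : Nat :=
  (if v % 2 = 0 then 1 else 0) + (if v % 3 = 0 then 2 else 0) + (if v % 5 = 0 then 4 else 0) +
  (if v % 7 = 0 then 8 else 0) + (if v % 11 = 0 then 16 else 0) + (if v % 13 = 0 then 32 else 0) +
  (if v % 17 = 0 then 64 else 0) + (if v % 19 = 0 then 128 else 0) + (if v % 23 = 0 then 256 else 0) +
  (if v % 29 = 0 then 512 else 0)

-- A's inner fold body / B's inner sweep body, as named functions
def pvF (pre : PySem.Dict Int Int) (num c : Int) (cur : PySem.Dict Int Int) (p : Int) : PySem.Dict Int Int :=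
  if Int.gcd p num = 1 then
    cur.insert (p * num) (PySem.Int.mod (cur.getD (p * num) 0 + pre.getD p 0 * c) pvModA)
  else cur

def pvG (dp : List Int) (mv : Nat) (c : Int) (ndp : List Int) (s : Nat) : List Int :=
  if s &&& mv = 0 then
    ndp.set (s ||| mv) (PySem.Int.mod (ndp.getD (s ||| mv) 0 + dp.getD s 0 * c) pvModA)
  else ndp

-- the coupling invariant between A's product-keyed dict and B's mask-indexed array
def pvInv (pre : PySem.Dict Int Int) (dp : List Int) : Prop :=
  dp.length = 1024 ∧ dp.getD 0 0 = 1 ∧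
  (∀ m : Nat, 1 ≤ m → m < 1024 → dp.getD m 0 ≡ pre.getD (pvP m) 0 [ZMOD pvModA]) ∧
  (∀ p ∈ pre.keys, ∃ m : Nat, 1 ≤ m ∧ m < 1024 ∧ p = pvP m) ∧
  pre.keys.Nodup

set_option maxRecDepth 100000 in
set_option maxHeartbeats 1000000 in

set_option maxRecDepth 100000 in
set_option maxHeartbeats 1000000 in
theorem pv_bigfact : ∀ v ∈ pvDctA, ∀ m ∈ List.range 1024,
    (Int.gcd (pvP m) v = 1 ↔ m &&& pvMaskOf v = 0) ∧
    (m &&& pvMaskOf v = 0 → pvP m * v = pvP (m ||| pvMaskOf v)) := by decide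

set_option maxRecDepth 100000 in
set_option maxHeartbeats 1000000 in
theorem pv_recover : ∀ m ∈ List.range 1024, pvMaskOf (pvP m) = m ∧ (1 ≤ m → 2 ≤ pvP m) := by decide

theorem pv_mask_facts : ∀ v ∈ pvDctA,
    1 ≤ pvMaskOf v ∧ pvMaskOf v < 1024 ∧ pvP (pvMaskOf v) = v ∧
    pvMaskD.contains v = true ∧ pvMaskD.getD v 0 = ((pvMaskOf v : Nat) : Int) := by decide

theorem pv_maskD_keys : pvMaskD.keys = pvDctA := by decide

theorem pv_ge2 {m : Nat} (h1 : 1 ≤ m) (h2 : m < 1024) : 2 ≤ pvP m :=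
  (pv_recover m (List.mem_range.mpr h2)).2 h1

theorem pv_inj {m m' : Nat} (h : m < 1024) (h' : m' < 1024) (he : pvP m = pvP m') : m = m' := by
  have h1 := (pv_recover m (List.mem_range.mpr h)).1
  have h2 := (pv_recover m' (List.mem_range.mpr h')).1
  rw [← h1, ← h2, he]

-- bit lemmas
theorem pv_xor_cancel {s mv : Nat} (h : s &&& mv = 0) : (s ||| mv) ^^^ mv = s := by
  apply Nat.eq_of_testBit_eq; intro i
  have hb := congrArg (Nat.testBit · i) h
  simp only [Nat.testBit_and, Nat.zero_testBit] at hb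
  simp only [Nat.testBit_xor, Nat.testBit_or]
  cases hs : s.testBit i <;> cases hm : mv.testBit i <;> simp_all

theorem pv_sub_split {m mv : Nat} (h : mv &&& m = mv) : (m ^^^ mv) &&& mv = 0 ∧ (m ^^^ mv) ||| mv = m := by
  constructor
  all_goals
    apply Nat.eq_of_testBit_eq; intro i
    have hb := congrArg (Nat.testBit · i) h
    simp only [Nat.testBit_and] at hb
    simp only [Nat.testBit_xor, Nat.testBit_or, Nat.testBit_and, Nat.zero_testBit]
    cases hs : m.testBit i <;> cases hm : mv.testBit i <;> simp_all

theorem pv_or_sub (s mv : Nat) : mv &&& (s ||| mv) = mv := by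
  apply Nat.eq_of_testBit_eq; intro i
  simp only [Nat.testBit_and, Nat.testBit_or]
  cases hs : s.testBit i <;> cases hm : mv.testBit i <;> simp_all

theorem pv_or_eq_zero {s mv : Nat} (h0 : s ||| mv = 0) : mv = 0 := by
  apply Nat.eq_of_testBit_eq; intro i
  have := congrArg (Nat.testBit · i) h0
  simp only [Nat.testBit_or, Nat.zero_testBit] at this ⊢
  exact (Bool.or_eq_false_iff.mp this).2

theorem pv_or_ne_zero {s mv : Nat} (h : 1 ≤ mv) : 1 ≤ s ||| mv := by
  by_contra hc
  have h0 : s ||| mv = 0 := by omega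
  have := pv_or_eq_zero h0
  omega

theorem pv_uniq {s s' mv : Nat} (h : s &&& mv = 0) (h' : s' &&& mv = 0)
    (he : s ||| mv = s' ||| mv) : s = s' := by
  rw [← pv_xor_cancel h, ← pv_xor_cancel h', he]

theorem pv_or_lt {a b : Nat} (ha : a < 1024) (hb : b < 1024) : a ||| b < 1024 := by
  have := Nat.or_lt_two_pow (n := 10) (x := a) (y := b) (by simpa using ha) (by simpa using hb)
  simpa using this

theorem pv_xor_lt {a b : Nat} (ha : a < 1024) (hb : b < 1024) : a ^^^ b < 1024 := by
  have := Nat.xor_lt_two_pow (n := 10) (x := a) (y := b) (by simpa using ha) (by simpa using hb)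
  simpa using this

-- ===== A-side fold characterization =====
theorem pv_foldA_not (pre : PySem.Dict Int Int) (num c : Int) :
    ∀ (l : List Int) (cur : PySem.Dict Int Int) (q : Int),
      (∀ p ∈ l, Int.gcd p num = 1 → q ≠ p * num) →
      (l.foldl (pvF pre num c) cur).getD q 0 = cur.getD q 0 := by
  intro l
  induction l with
  | nil => intro cur q _; rfl
  | cons a t ih =>
    intro cur q hq
    simp only [List.foldl_cons]
    rw [ih _ _ (fun p hp => hq p (List.mem_cons_of_mem a hp))]
    unfold pvF
    split
    · rename_i hga
      rw [PySem.Dict.getD_insert]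
      rw [if_neg (hq a (List.mem_cons_self) hga)]
    · rfl

theorem pv_foldA_mem (pre : PySem.Dict Int Int) (num c : Int) (hnum : 2 ≤ num) :
    ∀ (l : List Int) (cur : PySem.Dict Int Int) (p : Int), l.Nodup → p ∈ l → Int.gcd p num = 1 →
      (l.foldl (pvF pre num c) cur).getD (p * num) 0 =
        PySem.Int.mod (cur.getD (p * num) 0 + pre.getD p 0 * c) pvModA := by
  intro l
  induction l with
  | nil => intro _ _ _ h; simp at h
  | cons a t ih =>
    intro cur p hnd hp hgp
    have hnum0 : num ≠ 0 := by omega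
    simp only [List.foldl_cons]
    rcases List.mem_cons.mp hp with rfl | hpt
    · -- p = a: step writes, rest leaves it
      rw [pv_foldA_not pre num c t _ _ ?_]
      · unfold pvF
        rw [if_pos hgp, PySem.Dict.getD_insert, if_pos rfl]
      · intro p' hp' _ he
        have : p' = p := by
          have := mul_right_cancel₀ hnum0 he
          omega
        subst this
        exact (List.nodup_cons.mp hnd).1 hp'
    · -- p in the tail
      rw [ih _ p (List.nodup_cons.mp hnd).2 hpt hgp]
      have hne : p * num ≠ a * num := by
        intro he
        have : p = a := mul_right_cancel₀ hnum0 he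
        subst this
        exact (List.nodup_cons.mp hnd).1 hpt
      unfold pvF
      split
      · rw [PySem.Dict.getD_insert, if_neg hne]
      · rfl

theorem pv_foldA_keys (pre : PySem.Dict Int Int) (num c : Int) :
    ∀ (l : List Int) (cur : PySem.Dict Int Int) (q : Int),
      (q ∈ (l.foldl (pvF pre num c) cur).keys ↔
        q ∈ cur.keys ∨ ∃ p ∈ l, Int.gcd p num = 1 ∧ q = p * num) := by
  intro l
  induction l with
  | nil => intro cur q; simp
  | cons a t ih =>
    intro cur q
    simp only [List.foldl_cons]
    rw [ih]
    unfold pvF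
    split
    · rename_i hga
      rw [PySem.Dict.mem_keys_insert]
      constructor
      · rintro ((rfl | h) | h)
        · exact Or.inr ⟨a, List.mem_cons_self, hga, rfl⟩
        · exact Or.inl h
        · obtain ⟨p, hp, h1, h2⟩ := h
          exact Or.inr ⟨p, List.mem_cons_of_mem a hp, h1, h2⟩
      · rintro (h | ⟨p, hp, h1, h2⟩)
        · exact Or.inl (Or.inr h)
        · rcases List.mem_cons.mp hp with rfl | hpt
          · exact Or.inl (Or.inl h2)
          · exact Or.inr ⟨p, hpt, h1, h2⟩
    · rename_i hga
      constructor
      · rintro (h | ⟨p, hp, h1, h2⟩)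
        · exact Or.inl h
        · exact Or.inr ⟨p, List.mem_cons_of_mem a hp, h1, h2⟩
      · rintro (h | ⟨p, hp, h1, h2⟩)
        · exact Or.inl h
        · rcases List.mem_cons.mp hp with rfl | hpt
          · exact absurd h1 hga
          · exact Or.inr ⟨p, hpt, h1, h2⟩

theorem pv_foldA_nodup (pre : PySem.Dict Int Int) (num c : Int) :
    ∀ (l : List Int) (cur : PySem.Dict Int Int), cur.keys.Nodup →
      (l.foldl (pvF pre num c) cur).keys.Nodup := by
  intro l
  induction l with
  | nil => intro cur h; exact h
  | cons a t ih =>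
    intro cur h
    simp only [List.foldl_cons]
    apply ih
    unfold pvF
    split
    · exact PySem.Dict.nodup_keys_insert _ _ _ h
    · exact h

theorem pv_foldB_len (dp : List Int) (mv : Nat) (c : Int) :
    ∀ (l : List Nat) (ndp : List Int), (l.foldl (pvG dp mv c) ndp).length = ndp.length := by
  intro l
  induction l with
  | nil => intro ndp; rfl
  | cons a t ih =>
    intro ndp
    simp only [List.foldl_cons]
    rw [ih]
    unfold pvG
    split
    · exact List.length_set ..
    · rfl

theorem pv_foldB_not (dp : List Int) (mv : Nat) (c : Int) :
    ∀ (l : List Nat) (ndp : List Int) (t : Nat),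
      (∀ s ∈ l, s &&& mv = 0 → t ≠ s ||| mv) →
      (l.foldl (pvG dp mv c) ndp).getD t 0 = ndp.getD t 0 := by
  intro l
  induction l with
  | nil => intro _ _ _; rfl
  | cons a t ih =>
    intro ndp q hq
    simp only [List.foldl_cons]
    rw [ih _ _ (fun s hs => hq s (List.mem_cons_of_mem a hs))]
    unfold pvG
    split
    · rename_i ha
      have hne : q ≠ a ||| mv := hq a List.mem_cons_self ha
      simp only [List.getD, List.getElem?_set_ne (fun h => hne h.symm)]
    · rfl

theorem pv_foldB_mem (dp : List Int) (mv : Nat) (c : Int) :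
    ∀ (l : List Nat) (ndp : List Int) (s : Nat), l.Nodup → s ∈ l → s &&& mv = 0 →
      s ||| mv < ndp.length →
      (l.foldl (pvG dp mv c) ndp).getD (s ||| mv) 0 =
        PySem.Int.mod (ndp.getD (s ||| mv) 0 + dp.getD s 0 * c) pvModA := by
  intro l
  induction l with
  | nil => intro _ _ _ h; simp at h
  | cons a t ih =>
    intro ndp s hnd hs hsm hlen
    simp only [List.foldl_cons]
    rcases List.mem_cons.mp hs with rfl | hst
    · rw [pv_foldB_not dp mv c t _ _ ?_]
      · unfold pvG
        rw [if_pos hsm]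
        simp only [List.getD, List.getElem?_set_self hlen]
        rfl
      · intro s' hs' hs'm he
        have : s' = s := by
          rw [← pv_xor_cancel hs'm, ← he, pv_xor_cancel hsm]
        subst this
        exact (List.nodup_cons.mp hnd).1 hs'
    · rw [ih _ s (List.nodup_cons.mp hnd).2 hst hsm ?hl]
      case hl =>
        unfold pvG
        split
        · rw [List.length_set]; exact hlen
        · exact hlen
      unfold pvG
      split
      · rename_i ham
        have hne : s ||| mv ≠ a ||| mv := by
          intro he
          have : s = a := pv_uniq hsm ham he
          subst this
          exact (List.nodup_cons.mp hnd).1 hst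
        simp only [List.getD, List.getElem?_set_ne (fun h => hne h.symm)]
      · rfl

-- ===== bridging B's sweep to the Nat-indexed fold =====
theorem pv_stepB_eq (dp : List Int) (mv : Nat) (c : Int) :
    pvStepB dp ((mv : Nat) : Int) c = (List.range 1024).foldl (pvG dp mv c) dp := by
  unfold pvStepB
  have h1024 : (1024 : Int) = ((1024 : Nat) : Int) := by norm_num
  rw [h1024, PySem.List.pyRange_zero_nat, List.foldl_map]
  apply PySem.List.foldl_congr_mem
  intro ndp s _
  simp only [PySem.Int.band_natCast, PySem.Int.bor_natCast, PySem.List.pySetD_natCast,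
    PySem.List.pyGetD_natCast, pvG, pvModA, pvModB, Nat.cast_eq_zero]

-- ===== the coupled step and the main loop =====
theorem pv_mod_congr (x : Int) : PySem.Int.mod x pvModA ≡ x [ZMOD pvModA] := by
  rw [PySem.Int.mod_eq_emod_of_pos (by norm_num [pvModA])]
  exact Int.emod_emod_of_dvd x dvd_rfl

theorem pv_step' (num c : Int) (mv : Nat) (pre : PySem.Dict Int Int) (dp : List Int)
    (h1 : 1 ≤ mv) (h2 : mv < 1024) (h3 : pvP mv = num)
    (hg : ∀ s : Nat, s < 1024 → (Int.gcd (pvP s) num = 1 ↔ s &&& mv = 0))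
    (hp : ∀ s : Nat, s < 1024 → s &&& mv = 0 → pvP s * num = pvP (s ||| mv))
    (hInv : pvInv pre dp) :
    pvInv (pvStepA pre num c) ((List.range 1024).foldl (pvG dp mv c) dp) := by
  obtain ⟨hlen, h0, hcong, hkeys, hnd⟩ := hInv
  have hnum2 : 2 ≤ num := h3 ▸ pv_ge2 h1 h2
  have hnum0 : num ≠ 0 := by omega
  set cur := pre.keys.foldl (pvF pre num c) pre with hcur
  have hstepA : pvStepA pre num c = cur.insert num (cur.getD num 0 + c) := rfl
  -- a key of pre is never 1 and never maps to num
  have hkey_ne_target : ∀ p ∈ pre.keys, Int.gcd p num = 1 → num ≠ p * num := by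
    intro p hp' _ he
    obtain ⟨m', hm1, hm2, rfl⟩ := hkeys p hp'
    have h2m := pv_ge2 hm1 hm2
    nlinarith [he]
  -- generic: if pvP m is not a coprime-combination target, cur agrees with pre there
  have hcur_of_not_target : ∀ (m : Nat), m < 1024 → mv &&& m ≠ mv →
      cur.getD (pvP m) 0 = pre.getD (pvP m) 0 := by
    intro m hmlt hnsub
    apply pv_foldA_not
    intro p hp' hgp he
    obtain ⟨s'', hs1, hs2, rfl⟩ := hkeys p hp'
    have hs''m : s'' &&& mv = 0 := (hg s'' hs2).mp hgp
    have : pvP (s'' ||| mv) = pvP m := by rw [← hp s'' hs2 hs''m, ← he]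
    have : s'' ||| mv = m := pv_inj (pv_or_lt hs2 h2) hmlt this
    exact hnsub (this ▸ pv_or_sub s'' mv)
  refine ⟨?_, ?_, ?_, ?_, ?_⟩
  · rw [pv_foldB_len]; exact hlen
  · rw [pv_foldB_not dp mv c _ _ 0 ?_]
    · exact h0
    · intro s _ _ h
      have := pv_or_ne_zero (s := s) h1
      omega
  · -- the congruence invariant
    intro m hm1 hmlt
    rw [hstepA, PySem.Dict.getD_insert]
    by_cases hsub : mv &&& m = mv
    · obtain ⟨hs0, hsor⟩ := pv_sub_split hsub
      set s := m ^^^ mv with hs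
      have hslt : s < 1024 := pv_xor_lt hmlt h2
      have hBval : (List.foldl (pvG dp mv c) dp (List.range 1024)).getD m 0 =
          PySem.Int.mod (dp.getD m 0 + dp.getD s 0 * c) pvModA := by
        conv_lhs => rw [← hsor]
        rw [pv_foldB_mem dp mv c _ _ s List.nodup_range (List.mem_range.mpr hslt) hs0
            (by rw [hlen, hsor]; exact hmlt), hsor]
      rw [hBval]
      by_cases hm_mv : m = mv
      · subst hm_mv
        have hsz : s = 0 := by rw [hs, Nat.xor_self]
        rw [if_pos (h3 ▸ rfl : pvP m = num)]
        have hcurnum : cur.getD num 0 = pre.getD num 0 :=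
          pv_foldA_not pre num c _ _ _ hkey_ne_target
        rw [hcurnum, hsz, h0]
        calc PySem.Int.mod (dp.getD m 0 + 1 * c) pvModA
            ≡ dp.getD m 0 + 1 * c [ZMOD pvModA] := pv_mod_congr _
          _ ≡ pre.getD num 0 + c [ZMOD pvModA] := by
              have := (hcong m hm1 hmlt)
              rw [h3] at this
              simpa using this.add_right c
      · have hPne : pvP m ≠ num := by
          intro he
          exact hm_mv (pv_inj hmlt h2 (he.trans h3.symm))
        rw [if_neg hPne]
        have hs1' : 1 ≤ s := by
          rcases Nat.eq_zero_or_pos s with h | h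
          · exfalso; apply hm_mv; rw [← hsor, h, Nat.zero_or]
          · exact h
        by_cases hkey : pvP s ∈ pre.keys
        · have hgcd : Int.gcd (pvP s) num = 1 := (hg s hslt).mpr hs0
          have hprod : pvP s * num = pvP m := by rw [hp s hslt hs0, hsor]
          have hAval : cur.getD (pvP m) 0 =
              PySem.Int.mod (pre.getD (pvP m) 0 + pre.getD (pvP s) 0 * c) pvModA := by
            conv_lhs => rw [← hprod]
            rw [pv_foldA_mem pre num c hnum2 _ _ _ hnd hkey hgcd, hprod]
          rw [hAval]
          calc PySem.Int.mod (dp.getD m 0 + dp.getD s 0 * c) pvModA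
              ≡ dp.getD m 0 + dp.getD s 0 * c [ZMOD pvModA] := pv_mod_congr _
            _ ≡ pre.getD (pvP m) 0 + pre.getD (pvP s) 0 * c [ZMOD pvModA] :=
                (hcong m hm1 hmlt).add ((hcong s hs1' hslt).mul_right c)
            _ ≡ PySem.Int.mod (pre.getD (pvP m) 0 + pre.getD (pvP s) 0 * c) pvModA [ZMOD pvModA] :=
                (pv_mod_congr _).symm
        · have hz : pre.getD (pvP s) 0 = 0 := by
            apply PySem.Dict.getD_of_not_contains
            rw [PySem.Dict.contains_eq_decide_mem_keys]
            simp [hkey]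
          have hAval : cur.getD (pvP m) 0 = pre.getD (pvP m) 0 := by
            apply pv_foldA_not
            intro p hp' hgp he
            obtain ⟨s'', hs''1, hs''2, rfl⟩ := hkeys p hp'
            have hs''m : s'' &&& mv = 0 := (hg s'' hs''2).mp hgp
            have : pvP (s'' ||| mv) = pvP m := by rw [← hp s'' hs''2 hs''m, ← he]
            have hor : s'' ||| mv = m := pv_inj (pv_or_lt hs''2 h2) hmlt this
            have : s'' = s := pv_uniq hs''m hs0 (by rw [hor, hsor])
            rw [this] at hp'
            exact hkey hp'
          rw [hAval]
          calc PySem.Int.mod (dp.getD m 0 + dp.getD s 0 * c) pvModA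
              ≡ dp.getD m 0 + dp.getD s 0 * c [ZMOD pvModA] := pv_mod_congr _
            _ ≡ pre.getD (pvP m) 0 + 0 * c [ZMOD pvModA] :=
                (hcong m hm1 hmlt).add ((hz ▸ hcong s hs1' hslt).mul_right c)
            _ = pre.getD (pvP m) 0 := by ring
    · -- mv not a subset of m: both sides untouched
      have hBval : (List.foldl (pvG dp mv c) dp (List.range 1024)).getD m 0 = dp.getD m 0 := by
        apply pv_foldB_not
        intro s _ hsm he
        exact hsub (he ▸ pv_or_sub s mv)
      have hPne : pvP m ≠ num := by
        intro he
        have : m = mv := pv_inj hmlt h2 (he.trans h3.symm)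
        subst this
        exact hsub (Nat.and_self m)
      rw [hBval, if_neg hPne]
      rw [hcur_of_not_target m hmlt hsub]
      exact hcong m hm1 hmlt
  · -- keys shape
    intro q hq
    rw [hstepA] at hq
    rcases (PySem.Dict.mem_keys_insert _ _ _ _).mp hq with rfl | hq'
    · exact ⟨mv, h1, h2, h3.symm⟩
    · rcases (pv_foldA_keys pre num c _ _ _).mp hq' with h | ⟨p, hp', hgp, rfl⟩
      · exact hkeys q h
      · obtain ⟨s'', hs''1, hs''2, rfl⟩ := hkeys p hp'
        have hs''m : s'' &&& mv = 0 := (hg s'' hs''2).mp hgp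
        exact ⟨s'' ||| mv, pv_or_ne_zero h1, pv_or_lt hs''2 h2, (hp s'' hs''2 hs''m)⟩
  · rw [hstepA]
    exact PySem.Dict.nodup_keys_insert _ _ _ (pv_foldA_nodup pre num c _ _ hnd)

theorem pv_step (num c : Int) (pre : PySem.Dict Int Int) (dp : List Int)
    (hnum : num ∈ pvDctA) (hInv : pvInv pre dp) :
    pvInv (pvStepA pre num c) (pvStepB dp (pvMaskD.getD num 0) c) := by
  obtain ⟨hm1, hm2, hm3, _, hmg⟩ := pv_mask_facts num hnum
  rw [hmg, pv_stepB_eq]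
  exact pv_step' num c (pvMaskOf num) pre dp hm1 hm2 hm3
    (fun s hs => (pv_bigfact num hnum s (List.mem_range.mpr hs)).1)
    (fun s hs => (pv_bigfact num hnum s (List.mem_range.mpr hs)).2) hInv

theorem pv_main (L : List Int) (cnum : Int → Int) :
    ∀ (pre : PySem.Dict Int Int) (dp : List Int), pvInv pre dp →
      pvInv (L.foldl (fun pre k => if k ∈ pvDctA then pvStepA pre k (cnum k) else pre) pre)
            (L.foldl (fun dp k => if pvMaskD.contains k then pvStepB dp (pvMaskD.getD k 0) (cnum k) else dp) dp) := by
  induction L with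
  | nil => intro pre dp h; exact h
  | cons a t ih =>
    intro pre dp h
    simp only [List.foldl_cons]
    by_cases ha : a ∈ pvDctA
    · have hc : pvMaskD.contains a = true := (pv_mask_facts a ha).2.2.2.1
      rw [if_pos ha, if_pos hc]
      exact ih _ _ (pv_step a (cnum a) pre dp ha h)
    · have hc : pvMaskD.contains a = false := by
        rw [PySem.Dict.contains_eq_decide_mem_keys, pv_maskD_keys]
        simp [ha]
      rw [if_neg ha, if_neg (by simp [hc])]
      exact ih _ _ h

-- ===== sums and the count of ones =====
-- ones fold
theorem pv_ones_skip (f : Int → Int) : ∀ (ks : List Int) (o : Int), 1 ∉ ks →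
    ks.foldl (fun o k => if k = 1 then f k else o) o = o := by
  intro ks
  induction ks with
  | nil => intro o _; rfl
  | cons a t ih =>
    intro o h
    simp only [List.foldl_cons]
    have hne : a ≠ 1 := fun he => h (he ▸ List.mem_cons_self)
    rw [if_neg hne, ih _ (fun ht => h (List.mem_cons_of_mem a ht))]

theorem pv_ones (f : Int → Int) : ∀ (ks : List Int), ks.Nodup →
    ks.foldl (fun o k => if k = 1 then f k else o) 0 = if 1 ∈ ks then f 1 else 0 := by
  intro ks
  induction ks with
  | nil => intro _; rfl
  | cons a t ih =>
    intro hnd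
    simp only [List.foldl_cons]
    by_cases ha : a = 1
    · subst ha
      rw [if_pos rfl, pv_ones_skip f t _ (List.nodup_cons.mp hnd).1, if_pos List.mem_cons_self]
    · rw [if_neg ha, ih (List.nodup_cons.mp hnd).2]
      by_cases h1 : 1 ∈ t
      · rw [if_pos h1, if_pos (List.mem_cons_of_mem a h1)]
      · rw [if_neg h1, if_neg (by simp [h1, List.mem_cons]; exact fun h => ha h.symm)]

theorem pv_sum_congr (n : Int) : ∀ (l : List Nat) (f g : Nat → Int),
    (∀ x ∈ l, f x ≡ g x [ZMOD n]) → (l.map f).sum ≡ (l.map g).sum [ZMOD n] := by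
  intro l
  induction l with
  | nil => intro _ _ _; rfl
  | cons a t ih =>
    intro f g h
    simp only [List.map_cons, List.sum_cons]
    exact (h a List.mem_cons_self).add (ih f g (fun x hx => h x (List.mem_cons_of_mem a hx)))

theorem pv_sum_filter_zero : ∀ (l : List Nat) (f : Nat → Int) (p : Nat → Bool),
    (∀ x ∈ l, p x = false → f x = 0) → (l.map f).sum = ((l.filter p).map f).sum := by
  intro l
  induction l with
  | nil => intro _ _ _; rfl
  | cons a t ih =>
    intro f p h
    simp only [List.map_cons, List.sum_cons, List.filter_cons]
    by_cases ha : p a = true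
    · rw [if_pos ha]
      simp only [List.map_cons, List.sum_cons]
      rw [ih f p (fun x hx => h x (List.mem_cons_of_mem a hx))]
    · rw [if_neg ha, h a List.mem_cons_self (by simpa using ha),
        ih f p (fun x hx => h x (List.mem_cons_of_mem a hx)), zero_add]

theorem pv_sum (pre : PySem.Dict Int Int) (dp : List Int) (h : pvInv pre dp) :
    pre.values.sum ≡ (dp.drop 1).sum [ZMOD pvModA] := by
  obtain ⟨hlen, h0, hcong, hkeys, hnd⟩ := h
  have h1nk : (1 : Int) ∉ pre.keys := by
    intro h1
    obtain ⟨m, hm1, hm2, he⟩ := hkeys 1 h1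
    have := pv_ge2 hm1 hm2
    omega
  -- values as a sum over the key set, reindexed through pvP
  have hv : pre.values = pre.keys.map (fun k => pre.getD k 0) :=
    PySem.Dict.values_eq_map_keys pre hnd 0
  set flt := (List.range 1024).filter (fun m => decide (pvP m ∈ pre.keys)) with hflt
  have hperm : ((flt.map pvP).map (fun k => pre.getD k 0)).Perm (pre.keys.map (fun k => pre.getD k 0)) := by
    apply List.Perm.map
    apply (List.perm_ext_iff_of_nodup ?_ hnd).mpr
    · intro q
      constructor
      · intro hq
        obtain ⟨m, hm, rfl⟩ := List.mem_map.mp hq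
        have := (List.mem_filter.mp hm).2
        simpa using this
      · intro hq
        obtain ⟨m, hm1, hm2, rfl⟩ := hkeys q hq
        exact List.mem_map.mpr ⟨m, List.mem_filter.mpr ⟨List.mem_range.mpr hm2, by simpa using hq⟩, rfl⟩
    · apply List.Nodup.map_on
      · intro x hx y hy he
        exact pv_inj (List.mem_range.mp (List.mem_filter.mp hx).1)
          (List.mem_range.mp (List.mem_filter.mp hy).1) he
      · exact List.Nodup.filter _ List.nodup_range
  have hsum1 : pre.values.sum = ((List.range 1024).map (fun m => pre.getD (pvP m) 0)).sum := by
    rw [hv, ← hperm.sum_eq, List.map_map]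
    rw [pv_sum_filter_zero (List.range 1024) (fun m => pre.getD (pvP m) 0)
      (fun m => decide (pvP m ∈ pre.keys)) ?_]
    · rfl
    · intro m _ hm
      apply PySem.Dict.getD_of_not_contains
      rw [PySem.Dict.contains_eq_decide_mem_keys]
      simpa using hm
  -- split off the mask 0 (product 1, never a key)
  have hP0 : pvP 0 = 1 := rfl
  have h10 : pre.getD (1 : Int) 0 = 0 := by
    apply PySem.Dict.getD_of_not_contains
    rw [PySem.Dict.contains_eq_decide_mem_keys]
    simpa using h1nk
  have hsplit : ((List.range 1024).map (fun m => pre.getD (pvP m) 0)).sum =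
      ((List.range 1023).map (fun m => pre.getD (pvP (m + 1)) 0)).sum := by
    have : (1024 : Nat) = 1023 + 1 := rfl
    rw [this, List.range_succ_eq_map]
    simp only [List.map_cons, List.sum_cons, List.map_map]
    rw [hP0, h10, zero_add]
    rfl
  -- the dp side
  have hdrop : dp.drop 1 = (List.range 1023).map (fun m => dp.getD (m + 1) 0) := by
    apply List.ext_getElem
    · simp [hlen]
    · intro i h₁ h₂
      have hi : i < 1023 := by simpa using h₂
      simp only [List.getElem_drop, List.getElem_map, List.getElem_range]
      rw [List.getD_eq_getElem dp 0 (show i + 1 < dp.length by rw [hlen]; omega)]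
      have hidx : 1 + i = i + 1 := Nat.add_comm 1 i
      congr 1
  rw [hsum1, hsplit, hdrop]
  apply pv_sum_congr
  intro m hm
  have := hcong (m + 1) (by omega) (by have := List.mem_range.mp hm; omega)
  exact this.symm

def pvFB (cnt : Int → Int) (dp : List Int) (k : Int) : List Int :=
  if pvMaskD.contains k then pvStepB dp (pvMaskD.getD k 0) (cnt k) else dp

def pvFO (cnt : Int → Int) (o : Int) (k : Int) : Int :=
  if k = 1 then cnt k else o

-- ===== VERDICT (by name: the statement is the Claim_ definition above) =====
theorem lc_6334_spec : Claim_equal_lc_6334 := by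
  unfold Claim_equal_lc_6334
  intro nums _
  unfold Spec_lc_6334
  unfold lc_6334 lc_6334_alt
  simp only [PySem.Dict.keys_counter, PySem.Dict.getD_counter, PySem.Dict.items_counter]
  set ks := PySem.Set.ofList nums with hks
  have hknd : ks.Nodup := PySem.Set.nodup_ofList nums
  set cnum : Int → Int := fun k => (nums.count k : Int) with hcnum
  set dp0 : List Int := PySem.List.pySetD (List.replicate 1024 (0 : Int)) 0 1 with hdp0def
  -- split B's paired fold into its two independent components
  rw [List.foldl_map]
  have hbody : (fun (st : List Int × Int) (k : Int) =>
      (fun nc : Int × Int =>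
        let ones := if nc.1 = 1 then nc.2 else st.2
        if pvMaskD.contains nc.1 then (pvStepB st.1 (pvMaskD.getD nc.1 0) nc.2, ones) else (st.1, ones))
        ((fun k => (k, (nums.count k : Int))) k)) =
      (fun (st : List Int × Int) (k : Int) => (pvFB cnum st.1 k, pvFO cnum st.2 k)) := by
    funext st k
    simp only [pvFB, pvFO, hcnum]
    split <;> rfl
  rw [hbody, PySem.List.foldl_prod_mk (pvFB cnum) (pvFO cnum) ks dp0 0]
  -- the two exponents agree
  have hones : ks.foldl (pvFO cnum) 0 = (nums.count 1 : Int) := by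
    rw [show pvFO cnum = (fun o k => if k = 1 then cnum k else o) from rfl]
    rw [pv_ones cnum ks hknd]
    by_cases h1 : (1 : Int) ∈ ks
    · rw [if_pos h1]
    · rw [if_neg h1]
      have h1n : (1 : Int) ∉ nums := fun hc => h1 ((PySem.Set.mem_ofList nums 1).mpr hc)
      rw [List.count_eq_zero.mpr h1n]
      rfl
  rw [hones]
  -- the initial states satisfy the invariant
  have hdp0 : dp0 = (List.replicate 1024 (0 : Int)).set 0 1 := by
    rw [hdp0def, PySem.List.pySetD_of_nonneg _ _ (by norm_num)]
    rfl
  have hinv0 : pvInv PySem.Dict.empty ((List.replicate 1024 (0 : Int)).set 0 1) := by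
    refine ⟨by rw [List.length_set, List.length_replicate], ?_, ?_, ?_, ?_⟩
    · rw [List.getD_eq_getElem?_getD, List.getElem?_set_self (by rw [List.length_replicate]; omega)]
      rfl
    · intro m hm1 hm2
      rw [List.getD_eq_getElem?_getD, List.getElem?_set_ne (by omega), List.getElem?_replicate,
        if_pos hm2, PySem.Dict.getD_empty]
      rfl
    · intro p hp
      rw [PySem.Dict.keys_empty] at hp
      simp at hp
    · rw [PySem.Dict.keys_empty]; exact List.nodup_nil
  rw [hdp0]
  have hI := pv_main ks cnum PySem.Dict.empty _ hinv0
  have hfold : ks.foldl (pvFB cnum) ((List.replicate 1024 (0 : Int)).set 0 1) =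
      ks.foldl (fun dp k => if pvMaskD.contains k then pvStepB dp (pvMaskD.getD k 0) (cnum k) else dp)
        ((List.replicate 1024 (0 : Int)).set 0 1) := rfl
  rw [hfold]
  -- final congruence
  have hs := pv_sum _ _ hI
  rw [PySem.List.slice_from _ (by norm_num)]
  have hM : pvModB = pvModA := rfl
  rw [hM]
  set p := PySem.Int.powMod 2 (nums.count 1 : Int).toNat pvModA with hp
  have hfin := (hs.mul_right p).add_right (p - 1)
  rw [PySem.Int.mod_eq_emod_of_pos (show (0:Int) < pvModA by norm_num [pvModA]),
      PySem.Int.mod_eq_emod_of_pos (show (0:Int) < pvModA by norm_num [pvModA])]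
  exact hfin
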